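-- pv_equiv track=rewrite | github.com/wcw179/Project-5 | src/features/entropy/lz.py | _lz76_match_length
-- ===== SOURCE A (Python) =====
-- from typing import Literal, Sequence
--
-- def _lz76_match_length(seq: Sequence[int], start: int) -> int:
--     """Return the length of the shortest substring starting at `start` that has
--     not appeared before. Based on LZ76 parsing idea.
--     """
--     n = len(seq)
--     L = 1
--     while start + L <= n:
--         sub = tuple(seq[start : start + L])
--         # search in prefix [0:start]
--         found = False
--         for j in range(max(0, start - L), start):
--             if tuple(seq[j : j + L]) == sub:
--                 found = True
--                 break
--         if not found:
--             return L
--         L += 1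
--     return L
-- ===== SOURCE B (Python) =====
-- def _lz76_match_length(seq, start):
--     """Length of the shortest substring at `start` not matched in the window
--     behind it, via the Z-algorithm: one linear pass builds all
--     longest-common-prefix values against the suffix at `start`, then a single
--     prefix-maximum scan over candidate lengths finds the answer."""
--     n = len(seq)
--     if start < 0:
--         return 1
--     limit = n - start
--     if limit <= 0:
--         return 1
--     # t = suffix-at-start + separator + whole sequence; z[i] = lcp(t, t[i:])
--     t = list(seq[start:]) + [None] + list(seq)
--     nt = len(t)
--     z = [nt]
--     l = 0
--     r = 0
--     for i in range(1, nt):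
--         k = 0 if i >= r else min(r - i, z[i - l])
--         while i + k < nt and t[k] == t[i + k]:
--             k += 1
--         z.append(k)
--         if i + k > r:
--             l = i
--             r = i + k
--     # z[limit + 1 + j] = lcp(seq[j:], seq[start:]); scan candidate lengths
--     best = 0
--     for L in range(1, limit + 1):
--         if L <= start:
--             best = max(best, z[limit + 1 + start - L])
--         if best < L:
--             return L
--     return limit + 1
-- ===== Notes on version B (the rewrite author's own statement) =====
-- stated objective: alternative
-- what changed: A re-slices and re-compares the preceding window for every candidate length L; B runs one Z-algorithm pass over suffix+separator+sequence to get all longest-common-prefix values against the suffix at start, then finds the answer with a single prefix-maximum scan.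
import Mathlib
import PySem

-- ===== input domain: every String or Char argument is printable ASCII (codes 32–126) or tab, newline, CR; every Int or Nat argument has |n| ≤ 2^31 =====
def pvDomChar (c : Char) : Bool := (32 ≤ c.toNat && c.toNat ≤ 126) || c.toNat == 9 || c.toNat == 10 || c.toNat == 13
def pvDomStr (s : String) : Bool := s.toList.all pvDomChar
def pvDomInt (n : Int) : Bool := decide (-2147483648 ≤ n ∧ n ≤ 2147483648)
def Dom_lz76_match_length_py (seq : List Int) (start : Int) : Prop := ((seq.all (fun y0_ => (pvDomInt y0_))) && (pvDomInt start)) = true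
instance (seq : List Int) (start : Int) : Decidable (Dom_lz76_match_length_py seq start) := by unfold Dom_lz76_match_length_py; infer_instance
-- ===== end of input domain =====

-- B replaces A's re-slice-and-compare search for every candidate length by a Z-algorithm
-- pass computing all longest-common-prefix values, plus one prefix-maximum scan (objective: alternative).

-- ===== PORT A =====
-- inner 'for j in range(max(0, start - L), start)' with break ≡ any
def lzA_inner (seq : List Int) (start L : Int) (sub : List Int) : Bool :=
  (PySem.List.pyRange (max 0 (start - L)) start 1).any
    (fun j => PySem.List.slice seq (some j) (some (j + L)) == sub)

-- the 'while start + L <= n' loop; fuel bounds the iteration count and is never exhausted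
def lzA_loop (seq : List Int) (start : Int) : Nat → Int → Int
  | 0, L => L
  | fuel + 1, L =>
    if start + L ≤ (seq.length : Int) then
      if lzA_inner seq start L (PySem.List.slice seq (some start) (some (start + L))) then
        lzA_loop seq start fuel (L + 1)
      else L
    else L

def lz76_match_length_py (seq : List Int) (start : Int) : Int :=
  lzA_loop seq start (((seq.length : Int) - start).toNat + 1) 1

-- ===== PORT B =====
-- t = list(seq[start:]) + [None] + list(seq)  (None = the separator, hence Option Int)
def lzB_t (seq : List Int) (start : Int) : List (Option Int) :=
  (PySem.List.slice seq (some start) none).map some ++ [none] ++ seq.map some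

-- 'while i + k < nt and t[k] == t[i + k]: k += 1'; fuel = len(t) is never exhausted
def lzB_ext (t : List (Option Int)) (i : Int) : Nat → Int → Int
  | 0, k => k
  | fuel + 1, k =>
    if i + k < (t.length : Int) ∧ PySem.List.pyGet? t k = PySem.List.pyGet? t (i + k) then
      lzB_ext t i fuel (k + 1)
    else k

-- one iteration of the Z loop over state (z, l, r)
def lzB_zstep (t : List (Option Int)) (s : List Int × Int × Int) (i : Int) : List Int × Int × Int :=
  let k0 : Int := if s.2.2 ≤ i then 0 else min (s.2.2 - i) (PySem.List.pyGetD s.1 (i - s.2.1) 0)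
  let k := lzB_ext t i t.length k0
  if s.2.2 < i + k then (s.1 ++ [k], i, i + k) else (s.1 ++ [k], s.2.1, s.2.2)

-- 'z = [nt]; l = r = 0; for i in range(1, nt): …'
def lzB_zarr (t : List (Option Int)) : List Int :=
  ((PySem.List.pyRange 1 (t.length : Int) 1).foldl (lzB_zstep t) ([(t.length : Int)], 0, 0)).1

-- 'for L in range(1, limit + 1)' threading the running maximum `best`
def lzB_scan (z : List Int) (start limit : Int) : List Int → Int → Int
  | [], _ => limit + 1
  | L :: rest, best =>
    let best' := if L ≤ start then
        max best (PySem.List.pyGetD z (limit + 1 + start - L) 0) else best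
    if best' < L then L else lzB_scan z start limit rest best'

def lz76_match_length_py_alt (seq : List Int) (start : Int) : Int :=
  if start < 0 then 1
  else if (seq.length : Int) - start ≤ 0 then 1
  else
    lzB_scan (lzB_zarr (lzB_t seq start)) start ((seq.length : Int) - start)
      (PySem.List.pyRange 1 ((seq.length : Int) - start + 1) 1) 0

-- ===== PRECONDITION & SPEC =====
def Spec_lz76_match_length_py (seq : List Int) (start : Int) (out : Int) : Prop := out = lz76_match_length_py_alt seq start
instance (seq : List Int) (start : Int) (out : Int) : Decidable (Spec_lz76_match_length_py seq start out) := by unfold Spec_lz76_match_length_py; infer_instance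

-- ===== CLAIM (what is proved, stated in full; the proofs are below) =====
def Claim_equal_lz76_match_length_py : Prop := ∀ (seq : List Int) (start : Int), Dom_lz76_match_length_py seq start → Spec_lz76_match_length_py seq start (lz76_match_length_py seq start)

-- ===== LEMMAS AND PROOFS =====

-- proof-side specification device: the naive lcp of seq[i:] and seq[start:]
def lcpSAux (seq : List Int) (start i : Int) : Nat → Int → Int
  | 0, k => k
  | fuel + 1, k =>
    if start + k < (seq.length : Int) ∧
        PySem.List.pyGet? seq (i + k) = PySem.List.pyGet? seq (start + k) then
      lcpSAux seq start i fuel (k + 1)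
    else k

def lcpS (seq : List Int) (start i : Int) : Int :=
  lcpSAux seq start i ((seq.length : Int) - start).toNat 0

theorem lcpSAux_ge (seq : List Int) (start i : Int) :
    ∀ (fuel : Nat) (k : Int), k ≤ lcpSAux seq start i fuel k := by
  intro fuel
  induction fuel with
  | zero => intro k; simp [lcpSAux]
  | succ f ih =>
    intro k
    simp only [lcpSAux]
    split
    · exact le_trans (by omega) (ih (k + 1))
    · exact le_refl k

theorem lcpSAux_agree (seq : List Int) (start i : Int) :
    ∀ (fuel : Nat) (k t : Int), k ≤ t → t < lcpSAux seq start i fuel k →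
      start + t < (seq.length : Int) ∧
        PySem.List.pyGet? seq (i + t) = PySem.List.pyGet? seq (start + t) := by
  intro fuel
  induction fuel with
  | zero => intro k t hkt ht; simp [lcpSAux] at ht; omega
  | succ f ih =>
    intro k t hkt ht
    simp only [lcpSAux] at ht
    split at ht
    · rcases eq_or_lt_of_le hkt with h | h
      · subst h; assumption
      · exact ih (k + 1) t (by omega) ht
    · omega

theorem lcpSAux_stop (seq : List Int) (start i : Int) :
    ∀ (fuel : Nat) (k : Int), lcpSAux seq start i fuel k < k + fuel →
      ¬(start + lcpSAux seq start i fuel k < (seq.length : Int) ∧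
        PySem.List.pyGet? seq (i + lcpSAux seq start i fuel k) =
          PySem.List.pyGet? seq (start + lcpSAux seq start i fuel k)) := by
  intro fuel
  induction fuel with
  | zero => intro k h; simp [lcpSAux] at h
  | succ f ih =>
    intro k h
    by_cases hc : start + k < (seq.length : Int) ∧
        PySem.List.pyGet? seq (i + k) = PySem.List.pyGet? seq (start + k)
    · simp only [lcpSAux, if_pos hc] at h ⊢
      exact ih (k + 1) (by push_cast at h ⊢; omega)
    · simp only [lcpSAux, if_neg hc]
      exact hc

theorem lcpS_nonneg (seq : List Int) (start i : Int) : 0 ≤ lcpS seq start i :=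
  lcpSAux_ge seq start i _ 0

theorem lcpS_le (seq : List Int) (start i : Int) (hsn : start ≤ (seq.length : Int)) :
    start + lcpS seq start i ≤ (seq.length : Int) := by
  by_contra h
  push_neg at h
  have := (lcpSAux_agree seq start i (((seq.length : Int) - start).toNat) 0
    ((seq.length : Int) - start) (by omega) (by unfold lcpS at h; omega)).1
  omega

theorem lcp_ge_iff (seq : List Int) (start i L : Int) (h0 : 0 ≤ L)
    (hL : start + L ≤ (seq.length : Int)) :
    L ≤ lcpS seq start i ↔
      ∀ t : Int, 0 ≤ t → t < L →
        PySem.List.pyGet? seq (i + t) = PySem.List.pyGet? seq (start + t) := by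
  constructor
  · intro h t ht htL
    exact (lcpSAux_agree seq start i _ 0 t ht (lt_of_lt_of_le htL h)).2
  · intro h
    by_contra hlt
    push_neg at hlt
    have hr0 : 0 ≤ lcpS seq start i := lcpS_nonneg seq start i
    have hcast : ((((seq.length : Int) - start).toNat : Int)) = (seq.length : Int) - start :=
      Int.toNat_of_nonneg (by omega)
    unfold lcpS at hlt hr0
    have hstop := lcpSAux_stop seq start i (((seq.length : Int) - start).toNat) 0 (by omega)
    exact hstop ⟨by omega, h _ hr0 hlt⟩

theorem slice_eq_iff (seq : List Int) (a b L : Int) (ha : 0 ≤ a) (hb : 0 ≤ b) (h0 : 0 ≤ L)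
    (_haL : a + L ≤ (seq.length : Int)) (_hbL : b + L ≤ (seq.length : Int)) :
    (PySem.List.slice seq (some a) (some (a + L)) = PySem.List.slice seq (some b) (some (b + L))) ↔
      ∀ t : Int, 0 ≤ t → t < L →
        PySem.List.pyGet? seq (a + t) = PySem.List.pyGet? seq (b + t) := by
  rw [PySem.List.slice_toNat seq ha (by omega), PySem.List.slice_toNat seq hb (by omega)]
  have hta : (a + L).toNat - a.toNat = L.toNat := by omega
  have htb : (b + L).toNat - b.toNat = L.toNat := by omega
  rw [hta, htb]
  constructor
  · intro h t ht htL
    have hk : t.toNat < L.toNat := by omega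
    have := congrArg (fun l => l[t.toNat]?) h
    simp only [List.getElem?_take, hk, if_pos, List.getElem?_drop] at this
    rw [PySem.List.pyGet?_of_nonneg seq (by omega), PySem.List.pyGet?_of_nonneg seq (by omega)]
    have e1 : (a + t).toNat = a.toNat + t.toNat := by omega
    have e2 : (b + t).toNat = b.toNat + t.toNat := by omega
    rw [e1, e2]; exact this
  · intro h
    apply List.ext_getElem?
    intro k
    by_cases hk : k < L.toNat
    · simp only [List.getElem?_take, hk, if_pos, List.getElem?_drop]
      have := h (k : Int) (by omega) (by omega)
      rw [PySem.List.pyGet?_of_nonneg seq (by omega), PySem.List.pyGet?_of_nonneg seq (by omega)] at this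
      have e1 : (a + (k : Int)).toNat = a.toNat + k := by omega
      have e2 : (b + (k : Int)).toNat = b.toNat + k := by omega
      rw [e1, e2] at this; exact this
    · simp [hk]

theorem found_iff (seq : List Int) (start L : Int) (hstart : 0 ≤ start) (hL1 : 1 ≤ L)
    (hLn : start + L ≤ (seq.length : Int)) :
    lzA_inner seq start L (PySem.List.slice seq (some start) (some (start + L))) = true ↔
      ∃ d : Int, 1 ≤ d ∧ d ≤ L ∧ d ≤ start ∧ L ≤ lcpS seq start (start - d) := by
  unfold lzA_inner
  rw [List.any_eq_true]
  constructor
  · rintro ⟨j, hj, hslice⟩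
    rw [PySem.List.mem_pyRange_one] at hj
    rw [beq_iff_eq] at hslice
    refine ⟨start - j, by omega, by omega, by omega, ?_⟩
    rw [lcp_ge_iff seq start (start - (start - j)) L (by omega) hLn]
    have hj0 : 0 ≤ j := by omega
    have := (slice_eq_iff seq j start L hj0 hstart (by omega) (by omega) hLn).1 hslice
    intro t ht htL
    have e : start - (start - j) = j := by omega
    rw [e]
    exact this t ht htL
  · rintro ⟨d, hd1, hdL, hds, hlcp⟩
    refine ⟨start - d, ?_, ?_⟩
    · rw [PySem.List.mem_pyRange_one]; omega
    · rw [beq_iff_eq]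
      rw [lcp_ge_iff seq start (start - d) L (by omega) hLn] at hlcp
      exact (slice_eq_iff seq (start - d) start L (by omega) hstart (by omega) (by omega) hLn).2 hlcp

-- the extension predicate of the Z loop's while
def PtP (t : List (Option Int)) (i s : Int) : Prop :=
  i + s < (t.length : Int) ∧ PySem.List.pyGet? t s = PySem.List.pyGet? t (i + s)

-- canonical value of the while loop from base 0 with full fuel
def zlcp (t : List (Option Int)) (i : Int) : Int := lzB_ext t i t.length 0

theorem ext_ge (t : List (Option Int)) (i : Int) :
    ∀ (fuel : Nat) (k : Int), k ≤ lzB_ext t i fuel k := by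
  intro fuel
  induction fuel with
  | zero => intro k; simp [lzB_ext]
  | succ f ih =>
    intro k
    simp only [lzB_ext]
    split
    · exact le_trans (by omega) (ih (k + 1))
    · exact le_refl k

theorem ext_agree (t : List (Option Int)) (i : Int) :
    ∀ (fuel : Nat) (k s : Int), k ≤ s → s < lzB_ext t i fuel k → PtP t i s := by
  intro fuel
  induction fuel with
  | zero => intro k s hks hs; simp [lzB_ext] at hs; omega
  | succ f ih =>
    intro k s hks hs
    simp only [lzB_ext] at hs
    split at hs
    · rcases eq_or_lt_of_le hks with h | h
      · subst h; assumption
      · exact ih (k + 1) s (by omega) hs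
    · omega

theorem ext_stop (t : List (Option Int)) (i : Int) :
    ∀ (fuel : Nat) (k : Int), lzB_ext t i fuel k < k + fuel →
      ¬ PtP t i (lzB_ext t i fuel k) := by
  intro fuel
  induction fuel with
  | zero => intro k h; simp [lzB_ext] at h
  | succ f ih =>
    intro k h
    by_cases hc : i + k < (t.length : Int) ∧
        PySem.List.pyGet? t k = PySem.List.pyGet? t (i + k)
    · simp only [lzB_ext, if_pos hc] at h ⊢
      exact ih (k + 1) (by push_cast at h ⊢; omega)
    · simp only [lzB_ext, if_neg hc]
      exact hc

theorem zlcp_nonneg (t : List (Option Int)) (i : Int) : 0 ≤ zlcp t i :=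
  ext_ge t i _ 0

theorem zlcp_agree (t : List (Option Int)) (i s : Int) (hs : 0 ≤ s) (h : s < zlcp t i) :
    PtP t i s :=
  ext_agree t i _ 0 s hs h

theorem zlcp_add_le (t : List (Option Int)) (i : Int) (hi : 0 ≤ i)
    (hin : i ≤ (t.length : Int)) : i + zlcp t i ≤ (t.length : Int) := by
  by_contra h
  push_neg at h
  have := (zlcp_agree t i ((t.length : Int) - i) (by omega) (by omega)).1
  omega

theorem ext_ge_of_agree (t : List (Option Int)) (i L : Int) (fuel : Nat) (hL : 0 ≤ L)
    (hfuel : L ≤ (fuel : Int)) (h : ∀ s : Int, 0 ≤ s → s < L → PtP t i s) :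
    L ≤ lzB_ext t i fuel 0 := by
  by_contra hlt
  push_neg at hlt
  have hge : 0 ≤ lzB_ext t i fuel 0 := ext_ge t i fuel 0
  have hP := h _ hge hlt
  exact ext_stop t i fuel 0 (by omega) hP

theorem ext_eq_zlcp (t : List (Option Int)) (i k0 : Int) (hi : 1 ≤ i) (hk0 : 0 ≤ k0)
    (hbase : ∀ s : Int, 0 ≤ s → s < k0 → PtP t i s) :
    lzB_ext t i t.length k0 = zlcp t i := by
  have hge_e : k0 ≤ lzB_ext t i t.length k0 := ext_ge t i t.length k0
  have hge_z : 0 ≤ zlcp t i := zlcp_nonneg t i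
  rcases lt_trichotomy (lzB_ext t i t.length k0) (zlcp t i) with h | h | h
  · -- e < z : PtP at e, but stop at e
    exfalso
    have hP : PtP t i (lzB_ext t i t.length k0) := zlcp_agree t i _ (by omega) h
    have hbound : lzB_ext t i t.length k0 < k0 + (t.length : Int) := by
      have := hP.1; omega
    exact ext_stop t i t.length k0 (by omega) hP
  · exact h
  · -- z < e : PtP at z, but stop at z
    exfalso
    have hP : PtP t i (zlcp t i) := by
      by_cases hz : zlcp t i < k0
      · exact hbase _ hge_z hz
      · push_neg at hz
        exact ext_agree t i t.length k0 _ hz h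
    have hbound : zlcp t i < 0 + (t.length : Int) := by
      have := hP.1; omega
    exact ext_stop t i t.length 0 (by unfold zlcp at hbound; omega) hP

-- two association facts about pyGetD on an appended element
theorem pyGetD_append_left (z w : List Int) (j : Int) (hj : 0 ≤ j) (hjl : j < (z.length : Int)) :
    PySem.List.pyGetD (z ++ w) j 0 = PySem.List.pyGetD z j 0 := by
  rw [PySem.List.pyGetD_eq_getElem (z ++ w) 0 hj (by simp; omega),
      PySem.List.pyGetD_eq_getElem z 0 hj (by omega)]
  exact List.getElem_append_left (by omega)

theorem pyGetD_append_self (z : List Int) (k : Int) :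
    PySem.List.pyGetD (z ++ [k]) (z.length : Int) 0 = k := by
  rw [PySem.List.pyGetD_eq_getElem (z ++ [k]) 0 (by omega) (by simp)]
  simp

-- invariant of the Z fold: z holds the true lcp values, (l, r) is a sound window
def ZInv (t : List (Option Int)) (i : Int) (s : List Int × Int × Int) : Prop :=
  (s.1.length : Int) = i ∧
  (∀ j : Int, 0 ≤ j → j < i → PySem.List.pyGetD s.1 j 0 = zlcp t j) ∧
  0 ≤ s.2.1 ∧ s.2.1 ≤ s.2.2 ∧ s.2.2 ≤ s.2.1 + zlcp t s.2.1 ∧ s.2.2 ≤ (t.length : Int) ∧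
  (s.2.2 = 0 ∨ 1 ≤ s.2.1) ∧ s.2.1 < i

theorem zstep_inv (t : List (Option Int)) (i : Int) (s : List Int × Int × Int)
    (hi : 1 ≤ i) (hin : i < (t.length : Int)) (h : ZInv t i s) :
    ZInv t (i + 1) (lzB_zstep t s i) := by
  obtain ⟨hlen, hlook, hl0, hlr, hwin, hrn, hr0, hli⟩ := h
  set k0 : Int := if s.2.2 ≤ i then 0
    else min (s.2.2 - i) (PySem.List.pyGetD s.1 (i - s.2.1) 0) with hk0def
  have hk0 : 0 ≤ k0 ∧ ∀ u : Int, 0 ≤ u → u < k0 → PtP t i u := by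
    rw [hk0def]
    by_cases hir : s.2.2 ≤ i
    · rw [if_pos hir]; exact ⟨le_refl 0, by intro u hu hu'; omega⟩
    · rw [if_neg hir]
      push_neg at hir
      have hl1 : 1 ≤ s.2.1 := by rcases hr0 with h0 | h0 <;> omega
      have hlookup : PySem.List.pyGetD s.1 (i - s.2.1) 0 = zlcp t (i - s.2.1) :=
        hlook (i - s.2.1) (by omega) (by omega)
      rw [hlookup]
      refine ⟨by have := zlcp_nonneg t (i - s.2.1); omega, ?_⟩
      intro u hu hu'
      have hu1 : u < s.2.2 - i := by omega
      have hu2 : u < zlcp t (i - s.2.1) := by omega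
      -- window agreement: t[i+u] = t[i-l+u]
      have hx : PtP t s.2.1 (i - s.2.1 + u) :=
        zlcp_agree t s.2.1 (i - s.2.1 + u) (by omega) (by omega)
      -- prefix agreement: t[u] = t[i-l+u]
      have hy : PtP t (i - s.2.1) u := zlcp_agree t (i - s.2.1) u hu hu2
      constructor
      · have := hx.1; omega
      · have hx2 := hx.2
        rw [show s.2.1 + (i - s.2.1 + u) = i + u by omega] at hx2
        rw [hy.2]
        exact hx2
  have hk : lzB_ext t i t.length k0 = zlcp t i := ext_eq_zlcp t i k0 hi hk0.1 hk0.2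
  have hz0 : 0 ≤ zlcp t i := zlcp_nonneg t i
  have hzn : i + zlcp t i ≤ (t.length : Int) := zlcp_add_le t i (by omega) (by omega)
  have hlook2 : ∀ j : Int, 0 ≤ j → j < i + 1 →
      PySem.List.pyGetD (s.1 ++ [zlcp t i]) j 0 = zlcp t j := by
    intro j hj hji
    rcases lt_or_ge j i with hjlt | hjge
    · rw [pyGetD_append_left s.1 _ j hj (by omega)]
      exact hlook j hj hjlt
    · have hje : j = (s.1.length : Int) := by omega
      subst hje
      rw [pyGetD_append_self, hlen]
  have hstep : lzB_zstep t s i =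
      if s.2.2 < i + zlcp t i then (s.1 ++ [zlcp t i], i, i + zlcp t i)
      else (s.1 ++ [zlcp t i], s.2.1, s.2.2) := by
    show (if s.2.2 < i + lzB_ext t i t.length k0 then
        (s.1 ++ [lzB_ext t i t.length k0], i, i + lzB_ext t i t.length k0)
      else (s.1 ++ [lzB_ext t i t.length k0], s.2.1, s.2.2)) =
      if s.2.2 < i + zlcp t i then (s.1 ++ [zlcp t i], i, i + zlcp t i)
      else (s.1 ++ [zlcp t i], s.2.1, s.2.2)
    rw [hk]
  rw [hstep]
  by_cases hrk : s.2.2 < i + zlcp t i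
  · rw [if_pos hrk]
    refine ⟨?_, ?_, ?_, ?_, ?_, ?_, ?_, ?_⟩
    · show ((s.1 ++ [zlcp t i]).length : Int) = i + 1
      simp; omega
    · exact hlook2
    · show (0 : Int) ≤ i; omega
    · show i ≤ i + zlcp t i; omega
    · show i + zlcp t i ≤ i + zlcp t i; omega
    · show i + zlcp t i ≤ (t.length : Int); omega
    · exact Or.inr (show (1 : Int) ≤ i by omega)
    · show i < i + 1; omega
  · rw [if_neg hrk]
    refine ⟨?_, ?_, ?_, ?_, ?_, ?_, ?_, ?_⟩
    · show ((s.1 ++ [zlcp t i]).length : Int) = i + 1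
      simp; omega
    · exact hlook2
    · exact hl0
    · exact hlr
    · exact hwin
    · exact hrn
    · exact hr0
    · show s.2.1 < i + 1; omega

theorem zfold_inv (t : List (Option Int)) :
    ∀ (fuel : Nat) (i : Int) (cur : List Int × Int × Int), 1 ≤ i → i ≤ (t.length : Int) →
      (fuel : Int) = (t.length : Int) - i → ZInv t i cur →
      ZInv t (t.length : Int) ((PySem.List.pyRange i (t.length : Int) 1).foldl (lzB_zstep t) cur) := by
  intro fuel
  induction fuel with
  | zero =>
    intro i cur h1 h2 hf hinv
    have : i = (t.length : Int) := by simp at hf; omega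
    subst this
    rw [PySem.List.pyRange_one_eq_nil (le_refl _)]
    exact hinv
  | succ f ih =>
    intro i cur h1 h2 hf hinv
    have hin : i < (t.length : Int) := by push_cast at hf; omega
    rw [PySem.List.pyRange_one_cons hin]
    simp only [List.foldl_cons]
    exact ih (i + 1) (lzB_zstep t cur i) (by omega) (by omega)
      (by push_cast at hf ⊢; omega) (zstep_inv t i cur h1 hin hinv)

theorem zarr_spec (t : List (Option Int)) (ht : 1 ≤ (t.length : Int)) :
    ∀ j : Int, 0 ≤ j → j < (t.length : Int) →
      PySem.List.pyGetD (lzB_zarr t) j 0 = zlcp t j := by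
  have hz0 : zlcp t 0 = (t.length : Int) := by
    have hge : (t.length : Int) ≤ zlcp t 0 := by
      apply ext_ge_of_agree t 0 _ t.length (by omega) (by omega)
      intro s hs hsl
      exact ⟨by omega, by rw [zero_add]⟩
    have hle : 0 + zlcp t 0 ≤ (t.length : Int) := zlcp_add_le t 0 (le_refl 0) (by omega)
    omega
  have hinit : ZInv t 1 ([(t.length : Int)], 0, 0) := by
    refine ⟨?_, ?_, ?_, ?_, ?_, ?_, ?_, ?_⟩
    · show (([(t.length : Int)]).length : Int) = 1; simp
    · intro j hj hj1
      have hje : j = 0 := by omega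
      subst hje
      show PySem.List.pyGetD [(t.length : Int)] 0 0 = zlcp t 0
      rw [PySem.List.pyGetD_zero_cons, hz0]
    · show (0 : Int) ≤ 0; omega
    · show (0 : Int) ≤ 0; omega
    · show (0 : Int) ≤ 0 + zlcp t 0
      have := zlcp_nonneg t 0; omega
    · show (0 : Int) ≤ (t.length : Int); omega
    · exact Or.inl rfl
    · show (0 : Int) < 1; omega
  have := zfold_inv t ((t.length : Int) - 1).toNat 1 ([(t.length : Int)], 0, 0)
    (le_refl 1) ht (by omega) hinit
  intro j hj hjn
  exact this.2.1 j hj hjn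

-- indexing facts about t = suffix ++ [sep] ++ sequence
theorem t_length (seq : List Int) (start : Int) (hstart : 0 ≤ start)
    (hsn : start ≤ (seq.length : Int)) :
    ((lzB_t seq start).length : Int) = ((seq.length : Int) - start) + 1 + (seq.length : Int) := by
  unfold lzB_t
  rw [PySem.List.slice_from seq hstart]
  simp
  omega

theorem t_get_low (seq : List Int) (start s : Int) (hstart : 0 ≤ start)
    (hsn : start ≤ (seq.length : Int)) (hs : 0 ≤ s) (hsl : s < (seq.length : Int) - start) :
    PySem.List.pyGet? (lzB_t seq start) s = Option.map some (PySem.List.pyGet? seq (start + s)) := by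
  unfold lzB_t
  rw [PySem.List.slice_from seq hstart]
  rw [PySem.List.pyGet?_of_nonneg _ hs, PySem.List.pyGet?_of_nonneg seq (by omega)]
  rw [List.append_assoc]
  rw [List.getElem?_append_left (by simp; omega)]
  rw [List.getElem?_map, List.getElem?_drop,
    show start.toNat + s.toNat = (start + s).toNat by omega]

theorem t_get_sep (seq : List Int) (start : Int) (hstart : 0 ≤ start)
    (hsn : start ≤ (seq.length : Int)) :
    PySem.List.pyGet? (lzB_t seq start) ((seq.length : Int) - start) = some none := by
  unfold lzB_t
  rw [PySem.List.slice_from seq hstart]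
  rw [PySem.List.pyGet?_of_nonneg _ (by omega)]
  rw [List.append_assoc]
  rw [List.getElem?_append_right (by simp; omega)]
  have e : ((seq.length : Int) - start).toNat - ((seq.drop start.toNat).map some).length = 0 := by
    simp; omega
  rw [e]
  rfl

theorem t_get_high (seq : List Int) (start x : Int) (hstart : 0 ≤ start)
    (hsn : start ≤ (seq.length : Int)) (hx : 0 ≤ x) :
    PySem.List.pyGet? (lzB_t seq start) ((seq.length : Int) - start + 1 + x) =
      Option.map some (PySem.List.pyGet? seq x) := by
  unfold lzB_t
  rw [PySem.List.slice_from seq hstart]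
  rw [PySem.List.pyGet?_of_nonneg _ (by omega), PySem.List.pyGet?_of_nonneg seq hx]
  rw [List.append_assoc]
  rw [List.getElem?_append_right (by simp; omega)]
  have e : ((seq.length : Int) - start + 1 + x).toNat - ((seq.drop start.toNat).map some).length =
      x.toNat + 1 := by
    simp; omega
  rw [e, List.singleton_append, List.getElem?_cons_succ, List.getElem?_map]

-- the Z value at the mirrored position equals the naive lcp against the suffix at start
theorem zlcp_eq_lcpS (seq : List Int) (start j : Int) (hstart : 0 ≤ start)
    (hsn : start ≤ (seq.length : Int)) (hj : 0 ≤ j) :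
    zlcp (lzB_t seq start) ((seq.length : Int) - start + 1 + j) = lcpS seq start j := by
  set n : Int := (seq.length : Int) with hn
  set limit : Int := n - start with hlimit
  set t := lzB_t seq start with hts
  have htl : (t.length : Int) = limit + 1 + n := t_length seq start hstart hsn
  set it : Int := limit + 1 + j with hit
  -- the two step predicates agree below `limit`
  have hequiv : ∀ s : Int, 0 ≤ s → s < limit →
      (PtP t it s ↔ (start + s < n ∧
        PySem.List.pyGet? seq (j + s) = PySem.List.pyGet? seq (start + s))) := by
    intro s hs hsl
    have hlow : PySem.List.pyGet? t s = Option.map some (PySem.List.pyGet? seq (start + s)) :=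
      t_get_low seq start s hstart hsn hs hsl
    have hhigh : PySem.List.pyGet? t (it + s) = Option.map some (PySem.List.pyGet? seq (j + s)) := by
      rw [show it + s = limit + 1 + (j + s) by omega]
      exact t_get_high seq start (j + s) hstart hsn (by omega)
    unfold PtP
    rw [hlow, hhigh, htl]
    constructor
    · rintro ⟨h1, h2⟩
      refine ⟨by omega, ?_⟩
      cases hg : PySem.List.pyGet? seq (start + s) with
      | none => cases hg2 : PySem.List.pyGet? seq (j + s) with
        | none => rfl
        | some v => rw [hg, hg2] at h2; simp at h2
      | some v => cases hg2 : PySem.List.pyGet? seq (j + s) with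
        | none => rw [hg, hg2] at h2; simp at h2
        | some w => rw [hg, hg2] at h2; simp at h2; simp [h2]
    · rintro ⟨h1, h2⟩
      have hsome : PySem.List.pyGet? seq (start + s) =
          some (seq[(start + s).toNat]) := by
        exact PySem.List.pyGet?_eq_some_getElem seq (by omega) (by omega)
      have hjn : j + s < n := by
        by_contra hge
        push_neg at hge
        have : PySem.List.pyGet? seq (j + s) = none := by
          rw [PySem.List.pyGet?_of_nonneg seq (by omega)]
          apply List.getElem?_eq_none
          omega
        rw [this, hsome] at h2
        simp at h2
      exact ⟨by omega, by rw [h2]⟩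
  -- both values are at most `limit`
  have hPsep : ¬ PtP t it limit := by
    unfold PtP
    rw [show PySem.List.pyGet? t limit = some none from t_get_sep seq start hstart hsn]
    rw [show it + limit = limit + 1 + (j + limit) by omega]
    rw [t_get_high seq start (j + limit) hstart hsn (by omega)]
    rintro ⟨_, h2⟩
    cases hg : PySem.List.pyGet? seq (j + limit) with
    | none => rw [hg] at h2; simp at h2
    | some v => rw [hg] at h2; simp at h2
  have hzle : zlcp t it ≤ limit := by
    by_contra hgt
    push_neg at hgt
    exact hPsep (zlcp_agree t it limit (by omega) hgt)
  have hlle : lcpS seq start j ≤ limit := by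
    have := lcpS_le seq start j hsn
    omega
  have h1 : lcpS seq start j ≤ zlcp t it := by
    apply ext_ge_of_agree t it _ t.length (lcpS_nonneg seq start j) (by omega)
    intro s hs hsl
    have hP := lcpSAux_agree seq start j (((seq.length : Int) - start).toNat) 0 s hs
      (by unfold lcpS at hsl; exact hsl)
    exact (hequiv s hs (by omega)).2 ⟨hP.1, hP.2⟩
  have h2 : zlcp t it ≤ lcpS seq start j := by
    rw [lcp_ge_iff seq start j (zlcp t it) (zlcp_nonneg t it) (by omega)]
    intro s hs hsl
    exact ((hequiv s hs (by omega)).1 (zlcp_agree t it s hs hsl)).2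
  omega

-- B's scan lookup: z[limit + 1 + start - L] is the naive lcp at distance L
theorem z_get (seq : List Int) (start L : Int) (hstart : 0 ≤ start)
    (hsn : start ≤ (seq.length : Int)) (hlim : 0 < (seq.length : Int) - start)
    (h1 : 1 ≤ L) (hLs : L ≤ start) :
    PySem.List.pyGetD (lzB_zarr (lzB_t seq start))
        ((seq.length : Int) - start + 1 + start - L) 0 = lcpS seq start (start - L) := by
  have htl : ((lzB_t seq start).length : Int) =
      ((seq.length : Int) - start) + 1 + (seq.length : Int) := t_length seq start hstart hsn
  rw [show (seq.length : Int) - start + 1 + start - L =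
      (seq.length : Int) - start + 1 + (start - L) by omega]
  rw [zarr_spec (lzB_t seq start) (by omega) _ (by omega) (by omega)]
  exact zlcp_eq_lcpS seq start (start - L) hstart hsn (by omega)

-- loop invariant for the running maximum `best` entering iteration L of B's scan
def lzInv (seq : List Int) (start L best : Int) : Prop :=
  0 ≤ best ∧
  (∀ d : Int, 1 ≤ d → d < L → d ≤ start → lcpS seq start (start - d) ≤ best) ∧
  (best = 0 ∨ ∃ d : Int, 1 ≤ d ∧ d < L ∧ d ≤ start ∧ best = lcpS seq start (start - d))

theorem main_loop (seq : List Int) (start : Int) (hstart : 0 ≤ start)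
    (hlim : 0 < (seq.length : Int) - start) :
    ∀ (fuel : Nat) (L best : Int), 1 ≤ L → L ≤ (seq.length : Int) - start + 1 →
      (fuel : Int) = (seq.length : Int) - start + 2 - L → lzInv seq start L best →
      lzA_loop seq start fuel L =
        lzB_scan (lzB_zarr (lzB_t seq start)) start ((seq.length : Int) - start)
          (PySem.List.pyRange L ((seq.length : Int) - start + 1) 1) best := by
  intro fuel
  induction fuel with
  | zero => intro L best h1 h2 hf _; exfalso; simp at hf; omega
  | succ f ih =>
    intro L best h1 h2 hf hinv
    obtain ⟨hb0, hub, hatt⟩ := hinv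
    by_cases hc : start + L ≤ (seq.length : Int)
    · -- iteration runs
      rw [show PySem.List.pyRange L ((seq.length : Int) - start + 1) 1 =
            L :: PySem.List.pyRange (L + 1) ((seq.length : Int) - start + 1) 1 from
            PySem.List.pyRange_one_cons (by omega)]
      simp only [lzA_loop, lzB_scan, if_pos hc]
      set best' := if L ≤ start then
          max best (PySem.List.pyGetD (lzB_zarr (lzB_t seq start))
            ((seq.length : Int) - start + 1 + start - L) 0) else best with hbest'
      have hbestSpec : L ≤ best' ↔
          ∃ d : Int, 1 ≤ d ∧ d ≤ L ∧ d ≤ start ∧ L ≤ lcpS seq start (start - d) := by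
        rw [hbest']
        by_cases hLs : L ≤ start
        · rw [if_pos hLs, z_get seq start L hstart (by omega) hlim h1 hLs]
          constructor
          · intro h
            rcases le_max_iff.1 h with h' | h'
            · rcases hatt with h0 | ⟨d, hd1, hdL, hds, hde⟩
              · omega
              · exact ⟨d, hd1, by omega, hds, by omega⟩
            · exact ⟨L, h1, le_refl L, hLs, h'⟩
          · rintro ⟨d, hd1, hdL, hds, hdlcp⟩
            rcases eq_or_lt_of_le hdL with h' | h'
            · subst h'; exact le_max_of_le_right hdlcp
            · exact le_max_of_le_left (le_trans hdlcp (hub d hd1 h' hds))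
        · rw [if_neg hLs]
          constructor
          · intro h
            rcases hatt with h0 | ⟨d, hd1, hdL, hds, hde⟩
            · omega
            · exact ⟨d, hd1, by omega, hds, by omega⟩
          · rintro ⟨d, hd1, hdL, hds, hdlcp⟩
            exact le_trans hdlcp (hub d hd1 (by omega) hds)
      have hinv' : lzInv seq start (L + 1) best' := by
        rw [hbest']
        by_cases hLs : L ≤ start
        · rw [if_pos hLs, z_get seq start L hstart (by omega) hlim h1 hLs]
          refine ⟨le_trans hb0 (le_max_left _ _), ?_, ?_⟩
          · intro d hd1 hdL hds
            rcases eq_or_lt_of_le (show d ≤ L by omega) with h' | h'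
            · subst h'; exact le_max_right _ _
            · exact le_trans (hub d hd1 h' hds) (le_max_left _ _)
          · rcases max_choice best (lcpS seq start (start - L)) with h' | h'
            · rw [h']
              rcases hatt with h0 | ⟨d, hd1, hdL, hds, hde⟩
              · exact Or.inl h0
              · exact Or.inr ⟨d, hd1, by omega, hds, hde⟩
            · rw [h']
              exact Or.inr ⟨L, h1, by omega, hLs, rfl⟩
        · rw [if_neg hLs]
          refine ⟨hb0, ?_, ?_⟩
          · intro d hd1 hdL hds
            exact hub d hd1 (by omega) hds
          · rcases hatt with h0 | ⟨d, hd1, hdL, hds, hde⟩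
            · exact Or.inl h0
            · exact Or.inr ⟨d, hd1, by omega, hds, hde⟩
      by_cases hfound : lzA_inner seq start L
          (PySem.List.slice seq (some start) (some (start + L))) = true
      · rw [if_pos hfound]
        have hbL : ¬ best' < L := by
          have := hbestSpec.2 ((found_iff seq start L hstart h1 hc).1 hfound)
          omega
        rw [if_neg hbL]
        exact ih (L + 1) best' (by omega) (by omega) (by push_cast at hf ⊢; omega) hinv'
      · rw [if_neg hfound]
        have hbL : best' < L := by
          by_contra hge
          exact hfound ((found_iff seq start L hstart h1 hc).2 (hbestSpec.1 (by omega)))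
        rw [if_pos hbL]
    · -- loop exits: L = limit + 1
      have hL : L = (seq.length : Int) - start + 1 := by omega
      rw [show PySem.List.pyRange L ((seq.length : Int) - start + 1) 1 = ([] : List Int) from
            PySem.List.pyRange_one_eq_nil (by omega)]
      simp only [lzA_loop, lzB_scan, if_neg hc]
      omega

-- ===== VERDICT (by name: the statement is the Claim_ definition above) =====
theorem lz76_match_length_py_spec : Claim_equal_lz76_match_length_py := by
  intro seq start _dom
  unfold Spec_lz76_match_length_py lz76_match_length_py lz76_match_length_py_alt
  by_cases hneg : start < 0
  · rw [if_pos hneg]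
    simp only [lzA_loop]
    have hempty : lzA_inner seq start 1
        (PySem.List.slice seq (some start) (some (start + 1))) = false := by
      unfold lzA_inner
      rw [PySem.List.pyRange_one_eq_nil (by omega)]
      rfl
    split
    · rw [hempty]; simp
    · rfl
  · rw [if_neg hneg]
    by_cases hlim : (seq.length : Int) - start ≤ 0
    · rw [if_pos hlim]
      simp only [lzA_loop]
      rw [if_neg (by omega)]
    · rw [if_neg hlim]
      exact main_loop seq start (by omega) (by omega)
        (((seq.length : Int) - start).toNat + 1) 1 0 (by omega) (by omega)
        (by push_cast; omega)
        ⟨le_refl 0, by intro d h1 h2 _; omega, Or.inl rfl⟩
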